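-- pv_equiv track=rewrite | github.com/ZicsX/CP-Solutions | D_Max_GEQ_Sum.py | max_geq_sum
-- ===== SOURCE A (Python) =====
-- def max_geq_sum(arr):
--     n = len(arr)
--     if n == 1:
--         return "YES"
--     cum_sum = [0] * n
--     cum_sum[0] = arr[0]
--     for i in range(1, n):
--         cum_sum[i] = cum_sum[i - 1] + arr[i]
--     for i in range(1, n):
--         mn = min(cum_sum[i - 1], cum_sum[n - 1] - cum_sum[i])
--         mx = max(cum_sum[i - 1], cum_sum[n - 1] - cum_sum[i])
--         if mx >= mn + arr[i]:
--             return "YES"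
--     return "NO"
-- ===== SOURCE B (Python) =====
-- def max_geq_sum(arr):
--     if len(arr) == 1:
--         return "YES"
--     pref = []
--     s = 0
--     for x in arr:
--         s += x
--         pref.append(s)
--     total = pref[-1]
--     if 2 * max(pref[:-1]) >= total or 2 * min(pref[1:]) <= total:
--         return "YES"
--     return "NO"
-- ===== Notes on version B (the rewrite author's own statement) =====
-- stated objective: alternative
-- what changed: Instead of testing each split with min/max as A does, B builds the prefix-sum list once and decides the answer with two global reductions: YES iff 2*max(prefix[:-1]) >= total or 2*min(prefix[1:]) <= total, by the algebraic identity max(L,R) >= min(L,R)+x <=> 2*L >= total or 2*(L+x) <= total.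
import Mathlib
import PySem

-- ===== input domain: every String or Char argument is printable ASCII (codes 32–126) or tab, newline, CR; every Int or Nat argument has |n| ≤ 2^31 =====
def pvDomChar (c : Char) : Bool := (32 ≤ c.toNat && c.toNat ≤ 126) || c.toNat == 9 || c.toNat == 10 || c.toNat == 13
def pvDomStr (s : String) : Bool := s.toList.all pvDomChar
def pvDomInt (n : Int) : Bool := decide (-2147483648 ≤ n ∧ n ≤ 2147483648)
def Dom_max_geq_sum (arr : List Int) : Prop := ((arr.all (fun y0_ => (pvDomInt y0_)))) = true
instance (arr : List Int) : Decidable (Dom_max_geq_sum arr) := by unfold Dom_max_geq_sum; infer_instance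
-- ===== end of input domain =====

-- B replaces A's per-split min/max scan by two global extrema tests on the prefix-sum list (alternative algorithm, same O(n) cost).

-- ===== PORT A =====
-- A's second loop: 'for i in range(1, n): … return "YES" … / return "NO"'
def pvLoopA (arr cum : List Int) (n : Nat) : List Int → String
  | [] => "NO"
  | i :: is =>
    let mn := min (PySem.List.pyGetD cum (i - 1) 0)
                  (PySem.List.pyGetD cum ((n : Int) - 1) 0 - PySem.List.pyGetD cum i 0)
    let mx := max (PySem.List.pyGetD cum (i - 1) 0)
                  (PySem.List.pyGetD cum ((n : Int) - 1) 0 - PySem.List.pyGetD cum i 0)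
    if mx ≥ mn + PySem.List.pyGetD arr i 0 then "YES" else pvLoopA arr cum n is

def max_geq_sum (arr : List Int) : String :=
  let n := arr.length
  if n = 1 then "YES"
  else
    let cum0 : List Int := List.replicate n 0
    let cum0 := PySem.List.pySetD cum0 0 (PySem.List.pyGetD arr 0 0)
    let cum := (PySem.List.pyRange 1 n 1).foldl
      (fun cs i => PySem.List.pySetD cs i
        (PySem.List.pyGetD cs (i - 1) 0 + PySem.List.pyGetD arr i 0)) cum0
    pvLoopA arr cum n (PySem.List.pyRange 1 n 1)

-- ===== PORT B =====
def max_geq_sum_alt (arr : List Int) : String :=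
  if arr.length = 1 then "YES"
  else
    -- 'pref = []; s = 0; for x in arr: s += x; pref.append(s)'
    let pref := (arr.foldl (fun (acc : List Int × Int) x =>
        (acc.1 ++ [acc.2 + x], acc.2 + x)) (([] : List Int), (0 : Int))).1
    -- 'total = pref[-1]' — raises IndexError on empty arr (outside Pre_)
    match PySem.List.pyGet? pref (-1) with
    | none => "NO"   -- unreachable under Pre_: Python raises IndexError here
    | some total =>
      -- 'max(pref[:-1])' and 'min(pref[1:])' — both slices nonempty when len(arr) ≥ 2
      match PySem.List.max? (PySem.List.slice pref none (some (-1))) (fun y => y),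
            PySem.List.min? (PySem.List.slice pref (some 1) none) (fun y => y) with
      | some mx, some mn => if 2 * mx ≥ total ∨ 2 * mn ≤ total then "YES" else "NO"
      | _, _ => "NO"   -- unreachable under Pre_: Python max/min raise on empty
  
-- ===== PRECONDITION & SPEC =====
-- Pre_ excludes only the empty list, on which both Pythons raise IndexError.
def Pre_max_geq_sum (arr : List Int) : Prop := arr ≠ []
instance (arr : List Int) : Decidable (Pre_max_geq_sum arr) := by unfold Pre_max_geq_sum; infer_instance
def pvWitness_max_geq_sum : List Int := [3, 1, 2]

def Spec_max_geq_sum (arr : List Int) (out : String) : Prop := out = max_geq_sum_alt arr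
instance (arr : List Int) (out : String) : Decidable (Spec_max_geq_sum arr out) := by unfold Spec_max_geq_sum; infer_instance

-- ===== CLAIM =====
def Claim_equal_max_geq_sum : Prop := ∀ (arr : List Int), Dom_max_geq_sum arr → Pre_max_geq_sum arr → Spec_max_geq_sum arr (max_geq_sum arr)

-- ===== LEMMAS AND PROOFS =====

-- the prefix sums: pvG arr j = arr[0] + … + arr[j]
def pvG (arr : List Int) (j : Nat) : Int := (arr.take (j + 1)).sum

-- the prefix-sum array after its first m entries have been filled
def pvCumAt (arr : List Int) (n m : Nat) : List Int :=
  (List.range m).map (pvG arr) ++ List.replicate (n - m) 0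

lemma pvCumAt_getD (arr : List Int) (n m j : Nat) (hj : j < m) :
    (pvCumAt arr n m).getD j 0 = pvG arr j := by
  unfold pvCumAt
  rw [List.getD_append _ _ _ _ (by simpa using hj)]
  simp [List.getD_eq_getElem?_getD, hj]

lemma pvG_succ (arr : List Int) (k : Nat) (hk1 : 1 ≤ k) (hk : k < arr.length) :
    pvG arr k = pvG arr (k - 1) + arr[k]?.getD 0 := by
  cases k with
  | zero => omega
  | succ m =>
    unfold pvG
    simp only [Nat.add_sub_cancel]
    rw [List.take_add_one, List.sum_append]
    simp [hk]

lemma pvBuild_invariant (arr : List Int) (n : Nat) (hn : n = arr.length) (hn1 : 1 ≤ n) :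
    ∀ m : Nat, 1 ≤ m → m ≤ n →
    (PySem.List.pyRange 1 m 1).foldl
      (fun cs i => PySem.List.pySetD cs i
        (PySem.List.pyGetD cs (i - 1) 0 + PySem.List.pyGetD arr i 0))
      (PySem.List.pySetD (List.replicate n 0) 0 (PySem.List.pyGetD arr 0 0))
    = pvCumAt arr n m := by
  intro m
  induction m with
  | zero => omega
  | succ m ih =>
    intro _ hmn
    by_cases hm1 : 1 ≤ m
    · have hsplit : PySem.List.pyRange 1 ((m : Int) + 1) 1
          = PySem.List.pyRange 1 (m : Int) 1 ++ [(m : Int)] := by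
        simpa using PySem.List.pyRange_one_succ_right (a := 1) (b := (m : Int)) (by exact_mod_cast hm1)
      have hcast : ((m + 1 : Nat) : Int) = (m : Int) + 1 := by push_cast; ring
      rw [hcast, hsplit, List.foldl_append, ih hm1 (by omega)]
      have hprev : PySem.List.pyGetD (pvCumAt arr n m) ((m : Int) - 1) 0
          = pvG arr (m - 1) := by
        have h1 : ((m : Int) - 1) = ((m - 1 : Nat) : Int) := by omega
        rw [h1, PySem.List.pyGetD_natCast]
        exact pvCumAt_getD arr n m (m - 1) (by omega)
      have harr : PySem.List.pyGetD arr (m : Int) 0 = arr[m]?.getD 0 := by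
        simp [List.getD_eq_getElem?_getD]
      simp only [List.foldl_cons, List.foldl_nil, hprev, harr,
        PySem.List.pySetD_natCast]
      have hmlen : m < arr.length := by omega
      have hv : pvG arr (m - 1) + arr[m]?.getD 0 = pvG arr m :=
        (pvG_succ arr m hm1 hmlen).symm
      unfold pvCumAt
      rw [List.set_append_right _ _ (by simp)]
      have hrep : n - m = (n - (m + 1)) + 1 := by omega
      rw [hrep, List.replicate_succ]
      simp only [List.length_map, List.length_range, Nat.sub_self, List.set_cons_zero]
      rw [List.range_succ, List.map_append, List.append_assoc]
      simp [hv]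
    · have hm0 : m = 0 := by omega
      subst hm0
      rw [show ((0 + 1 : Nat) : Int) = 1 by norm_num,
        PySem.List.pyRange_one_eq_nil (by omega), List.foldl_nil]
      obtain ⟨a, rest, rfl⟩ : ∃ a rest, arr = a :: rest := by
        cases arr with
        | nil => rw [hn] at hn1; simp at hn1
        | cons a rest => exact ⟨a, rest, rfl⟩
      have hrep : List.replicate n (0 : Int) = 0 :: List.replicate (n - 1) 0 := by
        cases n with
        | zero => omega
        | succ k => simp [List.replicate_succ]
      rw [hrep]
      simp [pvCumAt, pvG, PySem.List.pySetD_of_nonneg, PySem.List.pyGetD_zero_cons]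

-- A's second loop returns "YES" iff some index in the list passes the test
lemma pvLoopA_eq_any (arr cum : List Int) (n : Nat) (is : List Int) :
    pvLoopA arr cum n is =
      if is.any (fun i => decide
          (max (PySem.List.pyGetD cum (i - 1) 0)
               (PySem.List.pyGetD cum ((n : Int) - 1) 0 - PySem.List.pyGetD cum i 0)
           ≥ min (PySem.List.pyGetD cum (i - 1) 0)
               (PySem.List.pyGetD cum ((n : Int) - 1) 0 - PySem.List.pyGetD cum i 0)
             + PySem.List.pyGetD arr i 0))
      then "YES" else "NO" := by
  induction is with
  | nil => simp [pvLoopA]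
  | cons i is ih =>
    simp only [pvLoopA, List.any_cons]
    by_cases h : max (PySem.List.pyGetD cum (i - 1) 0)
        (PySem.List.pyGetD cum ((n : Int) - 1) 0 - PySem.List.pyGetD cum i 0)
        ≥ min (PySem.List.pyGetD cum (i - 1) 0)
          (PySem.List.pyGetD cum ((n : Int) - 1) 0 - PySem.List.pyGetD cum i 0)
          + PySem.List.pyGetD arr i 0
    · simp [h]
    · simp [h, ih]

-- B's prefix fold builds exactly the list of prefix sums
lemma pvFold_pref (arr : List Int) : ∀ (acc : List Int) (s : Int),
    arr.foldl (fun (acc : List Int × Int) x => (acc.1 ++ [acc.2 + x], acc.2 + x)) (acc, s)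
    = (acc ++ (List.range arr.length).map (fun j => s + (arr.take (j + 1)).sum), s + arr.sum) := by
  induction arr with
  | nil => intro acc s; simp
  | cons x t ih =>
    intro acc s
    simp only [List.foldl_cons]
    rw [ih]
    rw [List.length_cons, List.range_succ_eq_map, List.map_cons, List.map_map]
    refine Prod.ext ?_ ?_
    · simp only [List.take_succ_cons, List.take_zero, List.sum_cons, List.sum_nil,
        Function.comp_def, List.append_assoc, List.cons_append, List.nil_append,
        Int.add_zero]
      congr 1
      congr 1
      exact List.map_congr_left fun j _ => by ring
    · simp only [List.sum_cons]; ring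

-- getD on the prefix-sum list
lemma pvP_getD (arr : List Int) (n j : Nat) (hj : j < n) :
    ((List.range n).map (pvG arr)).getD j 0 = pvG arr j := by
  simp [List.getD_eq_getElem?_getD, hj]

-- A's per-split test, evaluated on the prefix-sum list, is the two-sided prefix inequality
lemma pvCondP (arr : List Int) (n : Nat) (hn : n = arr.length) (k : Nat)
    (h1 : 1 ≤ k) (h2 : k < n) :
    (max (PySem.List.pyGetD ((List.range n).map (pvG arr)) ((k : Int) - 1) 0)
         (PySem.List.pyGetD ((List.range n).map (pvG arr)) ((n : Int) - 1) 0
           - PySem.List.pyGetD ((List.range n).map (pvG arr)) (k : Int) 0)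
     ≥ min (PySem.List.pyGetD ((List.range n).map (pvG arr)) ((k : Int) - 1) 0)
         (PySem.List.pyGetD ((List.range n).map (pvG arr)) ((n : Int) - 1) 0
           - PySem.List.pyGetD ((List.range n).map (pvG arr)) (k : Int) 0)
       + PySem.List.pyGetD arr (k : Int) 0)
    ↔ (2 * pvG arr (k - 1) ≥ pvG arr (n - 1) ∨ 2 * pvG arr k ≤ pvG arr (n - 1)) := by
  have e1 : ((k : Int) - 1) = ((k - 1 : Nat) : Int) := by omega
  have e2 : ((n : Int) - 1) = ((n - 1 : Nat) : Int) := by omega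
  rw [e1, e2]
  simp only [PySem.List.pyGetD_natCast]
  rw [pvP_getD arr n (k - 1) (by omega), pvP_getD arr n (n - 1) (by omega),
    pvP_getD arr n k h2]
  have hs := pvG_succ arr k h1 (by omega)
  rw [List.getD_eq_getElem?_getD]
  omega

theorem max_geq_sum_spec : Claim_equal_max_geq_sum := by
  intro arr _ hpre
  unfold Spec_max_geq_sum max_geq_sum max_geq_sum_alt
  by_cases h1 : arr.length = 1
  · simp [h1]
  · simp only [h1, if_false]
    have hn2 : 2 ≤ arr.length := by
      rcases arr with _ | ⟨a, t⟩
      · exact absurd rfl hpre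
      · simp only [List.length_cons] at h1 ⊢; omega
    -- both sides work on the same prefix-sum list P
    rw [pvBuild_invariant arr arr.length rfl (by omega) arr.length (by omega) le_rfl]
    have hcum : pvCumAt arr arr.length arr.length
        = (List.range arr.length).map (pvG arr) := by
      simp [pvCumAt]
    rw [hcum, pvLoopA_eq_any, pvFold_pref arr [] 0]
    simp only [List.nil_append, zero_add]
    have hGmap : (List.range arr.length).map (fun j => (arr.take (j + 1)).sum)
        = (List.range arr.length).map (pvG arr) := rfl
    rw [hGmap]
    -- abbreviations
    have hsplit : List.range arr.length
        = List.range (arr.length - 1) ++ [arr.length - 1] := by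
      conv_lhs => rw [show arr.length = (arr.length - 1) + 1 by omega]
      rw [List.range_succ]
    -- total = pref[-1]
    have htot : PySem.List.pyGet? ((List.range arr.length).map (pvG arr)) (-1)
        = some (pvG arr (arr.length - 1)) := by
      rw [hsplit, List.map_append, List.map_singleton]
      exact PySem.List.pyGet?_neg_one_append_singleton _ _
    simp only [htot]
    -- pref[:-1] and pref[1:]
    have hdrop : PySem.List.slice ((List.range arr.length).map (pvG arr)) none (some (-1))
        = (List.range (arr.length - 1)).map (pvG arr) := by
      rw [PySem.List.slice_to_neg_one, hsplit, List.map_append, List.map_singleton,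
        List.dropLast_concat]
    have htail : PySem.List.slice ((List.range arr.length).map (pvG arr)) (some 1) none
        = (List.range (arr.length - 1)).map (fun j => pvG arr (j + 1)) := by
      rw [PySem.List.slice_from_one]
      conv_lhs => rw [show arr.length = (arr.length - 1) + 1 by omega,
        List.range_succ_eq_map]
      simp [List.map_map, Function.comp_def]
    rw [hdrop, htail]
    -- max and min exist (n ≥ 2)
    have hne1 : (List.range (arr.length - 1)).map (pvG arr) ≠ [] := by
      simp; omega
    have hne2 : (List.range (arr.length - 1)).map (fun j => pvG arr (j + 1)) ≠ [] := by
      simp; omega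
    obtain ⟨mx, hmx⟩ : ∃ mx, PySem.List.max? ((List.range (arr.length - 1)).map (pvG arr))
        (fun y => y) = some mx := by
      cases h : PySem.List.max? ((List.range (arr.length - 1)).map (pvG arr)) (fun y => y) with
      | none => exact absurd ((PySem.List.max?_eq_none_iff _ _).mp h) hne1
      | some mx => exact ⟨mx, rfl⟩
    obtain ⟨mn, hmn⟩ : ∃ mn, PySem.List.min? ((List.range (arr.length - 1)).map
        (fun j => pvG arr (j + 1))) (fun y => y) = some mn := by
      cases h : PySem.List.min? ((List.range (arr.length - 1)).map
          (fun j => pvG arr (j + 1))) (fun y => y) with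
      | none => exact absurd ((PySem.List.min?_eq_none_iff _ _).mp h) hne2
      | some mn => exact ⟨mn, rfl⟩
    simp only [hmx, hmn]
    -- the two conditions are equivalent
    have key : ((PySem.List.pyRange 1 arr.length 1).any (fun i => decide
          (max (PySem.List.pyGetD ((List.range arr.length).map (pvG arr)) (i - 1) 0)
               (PySem.List.pyGetD ((List.range arr.length).map (pvG arr)) ((arr.length : Int) - 1) 0
                 - PySem.List.pyGetD ((List.range arr.length).map (pvG arr)) i 0)
           ≥ min (PySem.List.pyGetD ((List.range arr.length).map (pvG arr)) (i - 1) 0)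
               (PySem.List.pyGetD ((List.range arr.length).map (pvG arr)) ((arr.length : Int) - 1) 0
                 - PySem.List.pyGetD ((List.range arr.length).map (pvG arr)) i 0)
             + PySem.List.pyGetD arr i 0)) = true)
        ↔ (2 * mx ≥ pvG arr (arr.length - 1) ∨ 2 * mn ≤ pvG arr (arr.length - 1)) := by
      rw [List.any_eq_true]
      constructor
      · rintro ⟨i, hiR, hi⟩
        rw [PySem.List.mem_pyRange_one] at hiR
        obtain ⟨k, rfl⟩ : ∃ k : Nat, i = (k : Int) := ⟨i.toNat, by omega⟩
        have hk1 : 1 ≤ k := by omega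
        have hk2 : k < arr.length := by omega
        rw [decide_eq_true_iff, pvCondP arr arr.length rfl k hk1 hk2] at hi
        rcases hi with hL | hR
        · left
          have hmem : pvG arr (k - 1) ∈ (List.range (arr.length - 1)).map (pvG arr) :=
            List.mem_map.mpr ⟨k - 1, List.mem_range.mpr (by omega), rfl⟩
          have := PySem.List.max?_isMax hmx _ hmem
          simp only at this
          omega
        · right
          have hmem : pvG arr k ∈ (List.range (arr.length - 1)).map
              (fun j => pvG arr (j + 1)) :=
            List.mem_map.mpr ⟨k - 1, List.mem_range.mpr (by omega), by
              congr 1; omega⟩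
          have := PySem.List.min?_isMin hmn _ hmem
          simp only at this
          omega
      · rintro (hL | hR)
        · obtain ⟨j, hj, hjv⟩ := List.mem_map.mp (PySem.List.max?_mem hmx)
          rw [List.mem_range] at hj
          refine ⟨((j + 1 : Nat) : Int), ?_, ?_⟩
          · rw [PySem.List.mem_pyRange_one]; constructor <;> [omega; exact_mod_cast (by omega : j + 1 < arr.length)]
          · rw [decide_eq_true_iff, pvCondP arr arr.length rfl (j + 1) (by omega) (by omega)]
            left
            simp only [Nat.add_sub_cancel]
            omega
        · obtain ⟨j, hj, hjv⟩ := List.mem_map.mp (PySem.List.min?_mem hmn)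
          rw [List.mem_range] at hj
          refine ⟨((j + 1 : Nat) : Int), ?_, ?_⟩
          · rw [PySem.List.mem_pyRange_one]; constructor <;> [omega; exact_mod_cast (by omega : j + 1 < arr.length)]
          · rw [decide_eq_true_iff, pvCondP arr arr.length rfl (j + 1) (by omega) (by omega)]
            right
            omega
    by_cases hc : 2 * mx ≥ pvG arr (arr.length - 1) ∨ 2 * mn ≤ pvG arr (arr.length - 1)
    · rw [if_pos (key.mpr hc), if_pos hc]
    · rw [if_neg (fun h => hc (key.mp h)), if_neg hc]
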